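-- pv_equiv track=rewrite | github.com/fergusjproctor/Tic-Tac-Toe-with-AI | Tic-Tac-Toe with AI/task/tictactoe/tictactoe.py | check_almost_draw
-- ===== SOURCE A (Python) =====
-- def check_almost_draw(state2check, side):
--     # Check if about to draw (if not almost win and only one space left). This function should only be used after check almost
--     if sum(i.count(' ') for i in state2check) == 1:
--         count = 0
--         for i in state2check:
--             if ' ' in i:
--                 return str(count + 1) + ' ' + str(i.index(' ') + 1)
--             count += 1
--     else:
--         return None
-- ===== SOURCE B (Python) =====
-- def check_almost_draw(state2check, side):
--     # Single short-circuit pass: remember the one blank seen so far;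
--     # the moment a second blank appears, return None immediately (no counting).
--     found = None
--     for r, row in enumerate(state2check):
--         for c, ch in enumerate(row):
--             if ch == ' ':
--                 if found is not None:
--                     return None
--                 found = (r, c)
--     if found is None:
--         return None
--     return str(found[0] + 1) + ' ' + str(found[1] + 1)
-- ===== Notes on version B (the rewrite author's own statement) =====
-- stated objective: alternative
-- what changed: A sums per-row blank counts over the whole board and then rescans with a manual counter and str.index; B never counts: it makes one short-circuit pass keeping at most one remembered blank cell and returns None the instant a second blank is found.
import Mathlib
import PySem

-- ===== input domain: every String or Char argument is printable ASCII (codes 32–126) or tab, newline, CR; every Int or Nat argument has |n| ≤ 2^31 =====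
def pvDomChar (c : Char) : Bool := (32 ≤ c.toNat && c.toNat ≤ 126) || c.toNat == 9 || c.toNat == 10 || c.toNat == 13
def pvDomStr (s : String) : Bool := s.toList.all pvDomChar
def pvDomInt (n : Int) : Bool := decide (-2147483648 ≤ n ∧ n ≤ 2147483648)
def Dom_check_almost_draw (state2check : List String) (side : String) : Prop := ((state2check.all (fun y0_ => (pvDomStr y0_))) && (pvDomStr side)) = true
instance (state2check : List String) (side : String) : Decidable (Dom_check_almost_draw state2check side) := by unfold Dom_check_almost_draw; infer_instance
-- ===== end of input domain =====

-- B replaces A's count-then-rescan with one short-circuit pass keeping at most one blank cell (objective: alternative).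


-- ===== PORT A =====
-- the for-loop with the running 'count', returning on the first row containing a space
def pvLoopA : List String → Int → Option String
  | [], _ => none
  | i :: rest, count =>
    if PySem.Str.isIn " " i then
      some (PySem.Int.toStr (count + 1) ++ " " ++ PySem.Int.toStr (PySem.Str.find i " " + 1))
    else pvLoopA rest (count + 1)

def check_almost_draw (state2check : List String) (_side : String) : Option String :=
  if (state2check.map (fun i => (PySem.Str.count i " " : Int))).sum = 1 then
    pvLoopA state2check 0
  else none

-- ===== PORT B =====
-- inner loop over one row: 'found' is the at-most-one blank seen so far;
-- result 'none' = the early 'return None' on a second blank, 'some st' = loop fell through with state st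
def pvScanRow (r : Int) : List Char → Int → Option (Int × Int) → Option (Option (Int × Int))
  | [], _, found => some found
  | ch :: rest, c, found =>
    if ch = ' ' then
      match found with
      | some _ => none
      | none => pvScanRow r rest (c + 1) (some (r, c))
    else pvScanRow r rest (c + 1) found

-- outer loop over the rows, threading 'found' and propagating the early return
def pvScanRows : List String → Int → Option (Int × Int) → Option (Option (Int × Int))
  | [], _, found => some found
  | row :: rest, r, found =>
    match pvScanRow r row.toList 0 found with
    | none => none
    | some found' => pvScanRows rest (r + 1) found'

def check_almost_draw_alt (state2check : List String) (_side : String) : Option String :=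
  match pvScanRows state2check 0 none with
  | some (some (r, c)) => some (PySem.Int.toStr (r + 1) ++ " " ++ PySem.Int.toStr (c + 1))
  | _ => none

-- ===== PRECONDITION & SPEC =====
def Spec_check_almost_draw (state2check : List String) (side : String) (out : Option String) : Prop := out = check_almost_draw_alt state2check side
instance (state2check : List String) (side : String) (out : Option String) : Decidable (Spec_check_almost_draw state2check side out) := by unfold Spec_check_almost_draw; infer_instance

-- ===== CLAIM (what is proved, stated in full; the proofs are below) =====
def Claim_equal_check_almost_draw : Prop := ∀ (state2check : List String) (side : String), Dom_check_almost_draw state2check side → Spec_check_almost_draw state2check side (check_almost_draw state2check side)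

-- ===== LEMMAS AND PROOFS =====

-- proof-only: the list of all blank cells (row, col), and the ≤1-element classifier
def pvEmpties (state2check : List String) : List (Int × Int) :=
  (PySem.List.enumerate state2check).flatMap (fun p =>
    (PySem.List.enumerate p.2.toList).filterMap (fun q =>
      if q.2 = ' ' then some (p.1, q.1) else none))

def pvOptList : Option (Int × Int) → List (Int × Int)
  | none => []
  | some x => [x]

def pvG : List (Int × Int) → Option (Option (Int × Int))
  | [] => some none
  | [x] => some (some x)
  | _ :: _ :: _ => none

theorem pvG_eq_some (L : List (Int × Int)) (st : Option (Int × Int)) :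
    pvG L = some st → L = pvOptList st := by
  match L with
  | [] => intro h; simp [pvG] at h; simp [← h, pvOptList]
  | [x] => intro h; simp [pvG] at h; simp [← h, pvOptList]
  | a :: b :: t => intro h; simp [pvG] at h

-- Chars.count.go with a single-character needle counts occurrences of that character
theorem pv_countgo_single (c : Char) : ∀ (l : List Char) (fuel acc : Nat),
    l.length ≤ fuel → PySem.Chars.count.go [c] fuel l acc = acc + l.count c := by
  intro l
  induction l with
  | nil =>
    intro fuel acc _
    cases fuel <;> simp [PySem.Chars.count.go]
  | cons h t ih =>
    intro fuel acc hf
    cases fuel with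
    | zero => simp at hf
    | succ f =>
      rw [PySem.Chars.count.go]
      have hf' : t.length ≤ f := by simpa using hf
      by_cases hc : c = h
      · subst hc
        simp [List.isPrefixOf, ih f (acc + 1) hf']
        omega
      · have hb : (c == h) = false := by simp [hc]
        have hb' : (h == c) = false := by simp [Ne.symm hc]
        simp [List.isPrefixOf, hb, ih f acc hf', List.count_cons, hb']

-- Chars.find.go with a single-character needle: first index of that character, offset by k
theorem pv_findgo_single (c : Char) : ∀ (l : List Char) (k : Nat),
    PySem.Chars.find.go [c] l k = if c ∈ l then ((k : Int) + l.idxOf c) else -1 := by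
  intro l
  induction l with
  | nil => intro k; simp [PySem.Chars.find.go]
  | cons h t ih =>
    intro k
    rw [PySem.Chars.find.go]
    by_cases hc : c = h
    · simp [List.isPrefixOf, hc]
    · have hb : (c == h) = false := by simp [hc]
      simp [List.isPrefixOf, hb, ih (k + 1), Ne.symm hc]
      by_cases hm : c ∈ t
      · simp [hm]; ring
      · simp [hm]
        exact fun e => absurd e hc

theorem pv_count_single (s : String) : PySem.Str.count s " " = s.toList.count ' ' := by
  rw [PySem.Str.count_eq]
  have h1 : (" " : String).toList = [' '] := rfl
  rw [h1, PySem.Chars.count, if_neg (by simp),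
    pv_countgo_single ' ' s.toList s.toList.length 0 le_rfl]
  simp

theorem pv_find_single (s : String) :
    PySem.Str.find s " " = if ' ' ∈ s.toList then (s.toList.idxOf ' ' : Int) else -1 := by
  rw [PySem.Str.find_eq]
  have h1 : (" " : String).toList = [' '] := rfl
  rw [h1, PySem.Chars.find, pv_findgo_single ' ' s.toList 0]
  simp

theorem pv_isIn_single (s : String) : PySem.Str.isIn " " s = true ↔ ' ' ∈ s.toList := by
  rw [PySem.Str.isIn_iff_infix]
  have h1 : (" " : String).toList = [' '] := rfl
  rw [h1]
  constructor
  · intro h; exact h.mem (by simp)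
  · intro h
    obtain ⟨u, v, huv⟩ := List.append_of_mem h
    exact ⟨u, v, by simp [huv]⟩

-- the inner comprehension over one row: its length is the row's space count
theorem pv_inner_len (r : Int) : ∀ (t : List Char) (m : Int),
    ((PySem.List.enumerate t m).filterMap (fun q =>
      if q.2 = ' ' then some (r, q.1) else none)).length = t.count ' ' := by
  intro t
  induction t with
  | nil => intro m; simp [PySem.List.enumerate_nil]
  | cons h tl ih =>
    intro m
    rw [PySem.List.enumerate_cons]
    by_cases hc : h = ' '
    · simp [hc, ih (m + 1)]
    · simp [hc, ih (m + 1)]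

-- the inner comprehension on a row containing a space: head is (r, m + first index)
theorem pv_inner_head (r : Int) : ∀ (t : List Char) (m : Int), ' ' ∈ t →
    ∃ rest, (PySem.List.enumerate t m).filterMap (fun q =>
      if q.2 = ' ' then some (r, q.1) else none) = (r, m + t.idxOf ' ') :: rest := by
  intro t
  induction t with
  | nil => intro m h; simp at h
  | cons h tl ih =>
    intro m hm
    rw [PySem.List.enumerate_cons]
    by_cases hc : h = ' '
    · refine ⟨(PySem.List.enumerate tl (m + 1)).filterMap
        (fun q => if q.2 = ' ' then some (r, q.1) else none), ?_⟩
      simp [hc]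
    · have hm' : ' ' ∈ tl := by
        rcases List.mem_cons.1 hm with h1 | h1
        · exact absurd h1.symm hc
        · exact h1
      obtain ⟨rest, hrest⟩ := ih (m + 1) hm'
      refine ⟨rest, ?_⟩
      have hb : (h == ' ') = false := by simp [hc]
      have hidx : (h :: tl).idxOf ' ' = tl.idxOf ' ' + 1 := by
        simp [List.idxOf_cons, hb]
      simp [hc, hrest, hidx]
      omega

-- A's sum of counts equals the number of blank cells
theorem pv_flat_len : ∀ (l : List String) (n : Int),
    (l.map (fun i => (PySem.Str.count i " " : Int))).sum =
    (((PySem.List.enumerate l n).flatMap (fun p =>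
      (PySem.List.enumerate p.2.toList).filterMap (fun q =>
        if q.2 = ' ' then some (p.1, q.1) else none))).length : Int) := by
  intro l
  induction l with
  | nil => intro n; simp [PySem.List.enumerate_nil]
  | cons i t ih =>
    intro n
    rw [PySem.List.enumerate_cons]
    simp only [List.map_cons, List.sum_cons, List.flatMap_cons, List.length_append, ih (n + 1)]
    rw [pv_count_single, pv_inner_len n i.toList 0]
    push_cast
    ring

-- A's rescan loop, when exactly one blank cell (r, c) exists, formats that cell
theorem pv_loop_single : ∀ (l : List String) (n r c : Int),
    (PySem.List.enumerate l n).flatMap (fun p =>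
      (PySem.List.enumerate p.2.toList).filterMap (fun q =>
        if q.2 = ' ' then some (p.1, q.1) else none)) = [(r, c)] →
    pvLoopA l n = some (PySem.Int.toStr (r + 1) ++ " " ++ PySem.Int.toStr (c + 1)) := by
  intro l
  induction l with
  | nil => intro n r c h; simp [PySem.List.enumerate_nil] at h
  | cons i t ih =>
    intro n r c h
    rw [PySem.List.enumerate_cons] at h
    simp only [List.flatMap_cons] at h
    by_cases hm : ' ' ∈ i.toList
    · obtain ⟨rest, hrest⟩ := pv_inner_head n i.toList 0 hm
      rw [hrest] at h
      simp only [List.cons_append, List.cons.injEq] at h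
      obtain ⟨hhead, htail⟩ := h
      have hr : n = r := congrArg Prod.fst hhead
      have hcv : (i.toList.idxOf ' ' : Int) = c := by
        have := congrArg Prod.snd hhead
        simpa using this
      show pvLoopA (i :: t) n = _
      rw [pvLoopA]
      rw [if_pos ((pv_isIn_single i).2 hm)]
      rw [pv_find_single, if_pos hm, hr, hcv]
    · have hnil : (PySem.List.enumerate i.toList 0).filterMap (fun q =>
          if q.2 = ' ' then some (n, q.1) else none) = [] := by
        apply List.eq_nil_of_length_eq_zero
        rw [pv_inner_len]
        exact List.count_eq_zero.2 hm
      rw [hnil, List.nil_append] at h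
      show pvLoopA (i :: t) n = _
      rw [pvLoopA]
      rw [if_neg (by intro hcon; exact hm ((pv_isIn_single i).1 hcon))]
      exact ih (n + 1) r c h

-- the B inner loop is the classifier pvG of (carried blank ++ this row's blanks)
theorem pv_scanRow_eq (r : Int) : ∀ (t : List Char) (m : Int) (st : Option (Int × Int)),
    pvScanRow r t m st = pvG (pvOptList st ++ (PySem.List.enumerate t m).filterMap
      (fun q => if q.2 = ' ' then some (r, q.1) else none)) := by
  intro t
  induction t with
  | nil =>
    intro m st
    cases st <;> simp [pvScanRow, PySem.List.enumerate_nil, pvOptList, pvG]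
  | cons h tl ih =>
    intro m st
    rw [pvScanRow.eq_def, PySem.List.enumerate_cons]
    simp only []
    by_cases hc : h = ' '
    · cases st with
      | none => simp [hc, ih (m + 1) (some (r, m)), pvOptList]
      | some x => simp [hc, pvOptList, pvG]
    · simp [hc, ih (m + 1) st]

-- the B outer loop is the classifier pvG of (carried blank ++ all remaining blanks)
theorem pv_scanRows_eq : ∀ (l : List String) (n : Int) (st : Option (Int × Int)),
    pvScanRows l n st = pvG (pvOptList st ++ (PySem.List.enumerate l n).flatMap (fun p =>
      (PySem.List.enumerate p.2.toList).filterMap (fun q =>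
        if q.2 = ' ' then some (p.1, q.1) else none))) := by
  intro l
  induction l with
  | nil =>
    intro n st
    cases st <;> simp [pvScanRows, PySem.List.enumerate_nil, pvOptList, pvG]
  | cons row rest ih =>
    intro n st
    rw [pvScanRows, PySem.List.enumerate_cons]
    simp only [List.flatMap_cons, ← List.append_assoc]
    rw [pv_scanRow_eq n row.toList 0 st]
    cases hg : pvG (pvOptList st ++ (PySem.List.enumerate row.toList 0).filterMap
        (fun q => if q.2 = ' ' then some (n, q.1) else none)) with
    | none =>
      -- ≥ 2 elements already: appending more keeps pvG = none
      match hL : pvOptList st ++ (PySem.List.enumerate row.toList 0).filterMap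
          (fun q => if q.2 = ' ' then some (n, q.1) else none), hg with
      | [], hg => simp [pvG] at hg
      | [x], hg => simp [pvG] at hg
      | a :: b :: t, _ => simp [pvG]
    | some st' =>
      have hL := pvG_eq_some _ _ hg
      show pvScanRows rest (n + 1) st' = _
      rw [ih (n + 1) st', ← hL]

-- ===== VERDICT (by name: the statement is the Claim_ definition above) =====
theorem check_almost_draw_spec : Claim_equal_check_almost_draw := by
  intro l side _dom
  show check_almost_draw l side = check_almost_draw_alt l side
  rw [check_almost_draw, check_almost_draw_alt]
  have hB := pv_scanRows_eq l 0 none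
  simp only [pvOptList, List.nil_append] at hB
  have hlen := pv_flat_len l 0
  rw [hB]
  cases he : (PySem.List.enumerate l 0).flatMap (fun p =>
      (PySem.List.enumerate p.2.toList).filterMap (fun q =>
        if q.2 = ' ' then some (p.1, q.1) else none)) with
  | nil =>
    rw [he] at hlen
    rw [if_neg (by rw [hlen]; norm_num)]
    simp [pvG]
  | cons x xs =>
    cases xs with
    | nil =>
      obtain ⟨r, c⟩ := x
      rw [he] at hlen
      have h1 : (l.map (fun i => (PySem.Str.count i " " : Int))).sum = 1 := by
        rw [hlen]; simp
      rw [if_pos h1, pv_loop_single l 0 r c he]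
      simp [pvG]
    | cons y ys =>
      rw [he] at hlen
      rw [if_neg (by rw [hlen]; simp; omega)]
      simp [pvG]
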